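-- pv_equiv track=rewrite | github.com/xidongc/py_leetcode | hashmap/811 subdomain visit count.py | getParentDomains
-- ===== SOURCE A (Python) =====
-- def getParentDomains(domains):
--     domainList = [domains]
--     counts = domains.count('.')
--     for i in range(counts):
--         pos = domains.index('.')
--         domains = domains[pos+1:]
--         domainList.append(domains)
--     return domainList
-- ===== SOURCE B (Python) =====
-- def getParentDomains(domains):
--     return [domains] + [domains[i + 1:] for i, c in enumerate(domains) if c == '.']
-- ===== Notes on version B (the rewrite author's own statement) =====
-- stated objective: idiomatic
-- what changed: B replaces A's count-then-repeatedly-index-and-reslice mutation loop by a single comprehension over enumerate(domains) emitting the suffix after each dot separator directly.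
import Mathlib
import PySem

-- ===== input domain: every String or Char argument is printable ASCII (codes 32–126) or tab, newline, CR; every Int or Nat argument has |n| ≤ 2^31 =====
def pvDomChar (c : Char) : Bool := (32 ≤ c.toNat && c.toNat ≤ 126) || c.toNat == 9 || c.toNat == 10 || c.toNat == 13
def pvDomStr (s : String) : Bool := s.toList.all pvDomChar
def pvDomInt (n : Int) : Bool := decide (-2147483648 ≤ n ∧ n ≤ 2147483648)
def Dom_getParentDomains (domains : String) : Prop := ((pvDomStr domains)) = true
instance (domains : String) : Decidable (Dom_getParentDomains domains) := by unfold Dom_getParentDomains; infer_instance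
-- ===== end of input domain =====

-- B is the same task written idiomatically: one comprehension over enumerate instead of A's
-- count-then-repeatedly-index-and-reslice mutation loop; equal cost, no speed claim.

-- ===== PORT A =====
-- loop body of A ('pos = domains.index('.'); domains = domains[pos+1:]; domainList.append(domains)');
-- inside the loop a '.' is always present, so str.index coincides with PySem.Str.find (exact here).
def getParentDomainsStep (st : List String × String) (_ : Int) : List String × String :=
  let pos := PySem.Str.find st.2 "."
  let domains := PySem.Str.slice st.2 (some (pos + 1)) none
  (st.1 ++ [domains], domains)

def getParentDomains (domains : String) : List String :=
  let domainList : List String := [domains]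
  let counts := PySem.Str.count domains "."
  ((PySem.List.pyRange 0 (counts : Int) 1).foldl getParentDomainsStep (domainList, domains)).1

-- ===== PORT B =====
def getParentDomains_alt (domains : String) : List String :=
  domains :: (PySem.List.enumerate domains.toList 0).filterMap
    (fun p => if p.2 = '.' then some (PySem.Str.slice domains (some (p.1 + 1)) none) else none)

-- ===== PRECONDITION & SPEC =====
def Spec_getParentDomains (domains : String) (out : List String) : Prop := out = getParentDomains_alt domains
instance (domains : String) (out : List String) : Decidable (Spec_getParentDomains domains out) := by unfold Spec_getParentDomains; infer_instance

-- ===== CLAIM (what is proved, stated in full; the proofs are below) =====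
def Claim_equal_getParentDomains : Prop := ∀ (domains : String), Dom_getParentDomains domains → Spec_getParentDomains domains (getParentDomains domains)

-- ===== LEMMAS AND PROOFS =====

-- the successive suffixes A's loop produces, by iteration count
def sufsS : Nat → String → List String
  | 0, _ => []
  | n + 1, s =>
    let d := PySem.Str.slice s (some (PySem.Str.find s "." + 1)) none
    d :: sufsS n d

-- positions of '.' in a char list
def dotPos : List Char → List Nat
  | [] => []
  | c :: d => (if c = '.' then [0] else []) ++ (dotPos d).map (· + 1)

lemma foldl_ign {α β : Type} (g : α → α) : ∀ (l : List β) (a : α),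
    l.foldl (fun st _ => g st) a = g^[l.length] a := by
  intro l
  induction l with
  | nil => intro a; simp
  | cons x t ih => intro a; simp [List.foldl_cons, ih, Function.iterate_succ_apply]

lemma iterA : ∀ (n : Nat) (acc : List String) (cur : String),
    ((fun st => getParentDomainsStep st 0)^[n] (acc, cur)).1 = acc ++ sufsS n cur := by
  intro n
  induction n with
  | zero => intro acc cur; simp [sufsS]
  | succ n ih =>
      intro acc cur
      rw [Function.iterate_succ_apply]
      show ((fun st => getParentDomainsStep st 0)^[n] (getParentDomainsStep (acc, cur) 0)).1 = _
      rw [show getParentDomainsStep (acc, cur) 0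
            = (acc ++ [PySem.Str.slice cur (some (PySem.Str.find cur "." + 1)) none],
               PySem.Str.slice cur (some (PySem.Str.find cur "." + 1)) none) from rfl]
      rw [ih]
      simp [sufsS]

lemma A_eq (s : String) : getParentDomains s = s :: sufsS (PySem.Str.count s ".") s := by
  show ((PySem.List.pyRange 0 ((PySem.Str.count s "." : Nat) : Int) 1).foldl
      getParentDomainsStep ([s], s)).1 = _
  rw [show getParentDomainsStep = (fun st (_ : Int) => (fun st => getParentDomainsStep st 0) st) from rfl]
  rw [foldl_ign (fun st => getParentDomainsStep st 0)
    (PySem.List.pyRange 0 ((PySem.Str.count s "." : Nat) : Int) 1) ([s], s)]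
  rw [show (PySem.List.pyRange 0 ((PySem.Str.count s "." : Nat) : Int) 1).length
        = PySem.Str.count s "." by
      rw [PySem.List.length_pyRange_one]; omega]
  rw [iterA]
  simp

lemma findgo_first (c : Char) : ∀ (pre d : List Char) (k : Nat), c ∉ pre →
    PySem.Chars.find.go [c] (pre ++ c :: d) k = ((k : Int) + pre.length) := by
  intro pre
  induction pre with
  | nil =>
      intro d k _
      simp [PySem.Chars.find.go, List.isPrefixOf]
  | cons x t ih =>
      intro d k h
      have hx : ¬ (c == x) = true := by
        simp only [beq_iff_eq]
        intro hc; exact h (by simp [hc.symm])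
      rw [List.cons_append]
      rw [PySem.Chars.find.go]
      rw [if_neg (by simp [List.isPrefixOf, hx])]
      rw [ih d (k + 1) (by intro hm; exact h (List.mem_cons_of_mem _ hm))]
      simp only [List.length_cons]
      push_cast; ring

lemma countgo_single (c : Char) : ∀ (cs : List Char) (fuel acc : Nat), cs.length ≤ fuel →
    PySem.Chars.count.go [c] fuel cs acc = acc + cs.count c := by
  intro cs
  induction cs with
  | nil =>
      intro fuel acc _
      cases fuel <;> simp [PySem.Chars.count.go]
  | cons x t ih =>
      intro fuel acc hle
      cases fuel with
      | zero => simp at hle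
      | succ m =>
          have hle'' : t.length ≤ m := by simp at hle; omega
          rw [PySem.Chars.count.go]
          by_cases hx : c = x
          · subst hx
            rw [if_pos (by simp [List.isPrefixOf])]
            rw [show List.drop [c].length (c :: t) = t by simp]
            rw [ih m (acc + 1) hle'']
            simp
            omega
          · have hbx : (c == x) = false := beq_eq_false_iff_ne.mpr hx
            rw [if_neg (by simp [List.isPrefixOf, hbx])]
            rw [ih m acc hle'']
            simp [List.count_cons, beq_iff_eq]
            exact fun h => hx h.symm

lemma count_single (c : Char) (cs : List Char) : PySem.Chars.count cs [c] = cs.count c := by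
  rw [PySem.Chars.count, if_neg (by simp)]
  simpa using countgo_single c cs cs.length 0 (le_refl _)

lemma dotPos_nil_of_not_mem : ∀ (cs : List Char), '.' ∉ cs → dotPos cs = [] := by
  intro cs
  induction cs with
  | nil => intro _; rfl
  | cons x t ih =>
      intro h
      have hx : ¬ x = '.' := fun hc => h (by simp [hc])
      simp [dotPos, hx, ih (fun hm => h (List.mem_cons_of_mem _ hm))]

lemma dotPos_append : ∀ (xs ys : List Char),
    dotPos (xs ++ ys) = dotPos xs ++ (dotPos ys).map (· + xs.length) := by
  intro xs
  induction xs with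
  | nil => intro ys; simp [dotPos]
  | cons x t ih =>
      intro ys
      simp [List.cons_append, dotPos, ih, List.map_append, List.map_map, List.append_assoc,
        List.length_cons, Function.comp_def, Nat.add_assoc]

lemma fmEnum {γ : Type} (g : Int → γ) : ∀ (d : List Char) (t : Int),
    (PySem.List.enumerate d t).filterMap
      (fun p => if p.2 = '.' then some (g p.1) else none)
    = (dotPos d).map (fun j : Nat => g (t + j)) := by
  intro d
  induction d with
  | nil => intro t; simp [PySem.List.enumerate_nil, dotPos]
  | cons c d ih =>
      intro t
      rw [PySem.List.enumerate_cons]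
      simp only [List.filterMap_cons]
      rw [ih (t + 1)]
      by_cases hc : c = '.'
      · subst hc
        simp [dotPos, List.map_map, Function.comp_def, Nat.cast_add, Nat.cast_one,
          add_comm, add_left_comm]
      · simp [hc, dotPos, List.map_map, Function.comp_def, Nat.cast_add, Nat.cast_one,
          add_comm, add_left_comm]

lemma B_eq (s : String) : getParentDomains_alt s
    = s :: (dotPos s.toList).map
        (fun j : Nat => PySem.Str.slice s (some ((j : Int) + 1)) none) := by
  unfold getParentDomains_alt
  rw [fmEnum (fun i => PySem.Str.slice s (some (i + 1)) none) s.toList 0]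
  simp

-- first-occurrence decomposition
lemma first_split (c : Char) : ∀ (cs : List Char), c ∈ cs →
    ∃ pre d, cs = pre ++ c :: d ∧ c ∉ pre := by
  intro cs
  induction cs with
  | nil => intro h; simp at h
  | cons x t ih =>
      intro h
      by_cases hx : x = c
      · exact ⟨[], t, by simp [hx], by simp⟩
      · have hm : c ∈ t := by
          rcases List.mem_cons.mp h with h1 | h1
          · exact absurd h1.symm hx
          · exact h1
        obtain ⟨pre, d, hsp, hpre⟩ := ih hm
        exact ⟨x :: pre, d, by simp [hsp], by
          intro hc
          rcases List.mem_cons.mp hc with h2 | h2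
          · exact hx h2.symm
          · exact hpre h2⟩

lemma slice_toList (s : String) (a : Int) (ha : 0 ≤ a) :
    (PySem.Str.slice s (some a) none).toList = s.toList.drop a.toNat := by
  rw [PySem.Str.slice, String.toList_ofList, PySem.Chars.slice_eq_listSlice,
    PySem.List.slice_from s.toList ha]

set_option maxHeartbeats 1000000 in
lemma main_eq : ∀ (n : Nat) (s : String), s.toList.count '.' = n →
    (dotPos s.toList).map
      (fun j : Nat => PySem.Str.slice s (some ((j : Int) + 1)) none) = sufsS n s := by
  intro n
  induction n with
  | zero =>
      intro s hc
      rw [dotPos_nil_of_not_mem s.toList (List.count_eq_zero.mp hc)]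
      rfl
  | succ n ih =>
      intro s hc
      have hmem : '.' ∈ s.toList := by
        rw [← List.count_pos_iff]; omega
      obtain ⟨pre, d, hsp, hpre⟩ := first_split '.' s.toList hmem
      have hfind : PySem.Str.find s "." = (pre.length : Int) := by
        rw [PySem.Str.find, show (".".toList) = ['.'] from rfl, PySem.Chars.find, hsp]
        have := findgo_first '.' pre d 0 hpre
        rw [this]; push_cast; ring
      set d' := PySem.Str.slice s (some (PySem.Str.find s "." + 1)) none with hd'def
      have hd'list : d'.toList = d := by
        rw [hd'def, hfind, slice_toList s _ (by positivity)]
        rw [show ((pre.length : Int) + 1).toNat = pre.length + 1 by omega]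
        rw [hsp, show pre ++ '.' :: d = (pre ++ ['.']) ++ d by simp]
        rw [show pre.length + 1 = (pre ++ ['.']).length by simp]
        exact List.drop_left
      have hdot : dotPos s.toList = pre.length :: (dotPos d).map (· + (pre.length + 1)) := by
        rw [hsp, dotPos_append, dotPos_nil_of_not_mem pre hpre]
        simp [dotPos, List.map_map, Function.comp_def, Nat.add_comm, Nat.add_left_comm]
      have hcount : d.count '.' = n := by
        have : s.toList.count '.' = pre.count '.' + (1 + d.count '.') := by
          rw [hsp]; simp [List.count_append]; omega
        have hp0 : pre.count '.' = 0 := List.count_eq_zero.mpr hpre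
        omega
      rw [hdot]
      show PySem.Str.slice s (some ((pre.length : Int) + 1)) none
            :: ((dotPos d).map (· + (pre.length + 1))).map
                (fun j : Nat => PySem.Str.slice s (some ((j : Int) + 1)) none)
          = sufsS (n + 1) s
      rw [show sufsS (n + 1) s = d' :: sufsS n d' from rfl]
      congr 1
      · rw [hd'def, hfind]
      · rw [List.map_map]
        rw [← ih d' (by rw [hd'list]; exact hcount)]
        rw [hd'list]
        apply List.map_congr_left
        intro j _
        simp only [Function.comp]
        apply String.toList_injective
        rw [slice_toList _ _ (by positivity), slice_toList _ _ (by positivity)]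
        rw [hd'list, hsp]
        rw [show ((((j : Nat) + (pre.length + 1) : Nat) : Int) + 1).toNat
              = (pre.length + 1) + (j + 1) by push_cast; omega]
        rw [show (((j : Nat) : Int) + 1).toNat = j + 1 by omega]
        rw [show pre ++ '.' :: d = (pre ++ ['.']) ++ d by simp]
        rw [show (pre.length + 1) + (j + 1) = (pre ++ ['.']).length + (j + 1) by simp]
        rw [← List.drop_drop, List.drop_left]

-- ===== VERDICT (by name: the statement is the Claim_ definition above) =====
theorem getParentDomains_spec : Claim_equal_getParentDomains := by
  intro s _
  show getParentDomains s = getParentDomains_alt s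
  rw [A_eq, B_eq]
  congr 1
  rw [main_eq (PySem.Str.count s ".") s]
  rw [PySem.Str.count, show (".".toList) = ['.'] from rfl, count_single]
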